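-- pv_equiv track=rewrite | github.com/denemorhun/Python-Reference-Guide | Coding Interview Prep/Hackerrank/Arrays/closedPaths.py | closedPaths
-- ===== SOURCE A (Python) =====
-- def closedPaths(number) -> int:
--     # count number of closed paths
--     cp = 0
--
--     while number > 0:
--         # find last digit d
--         d = number % 10
--
--         # these numbers have cp of 1
--         if(d == 0 or d == 4 or d == 6 or d == 9):
--             cp += 1
--
--         # 8 has cp of 2
--         elif d == 8:
--             cp += 2
--         # remove last digit and repeat loop by dividing by 10
--         number//=10
--
--     return cp
-- ===== SOURCE B (Python) =====
-- # closed paths per digit glyph, indexed by digit value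
-- W = [1, 0, 0, 0, 1, 0, 1, 0, 2, 1]
--
-- def _holes(n, k):
--     # closed paths in the k-digit zero-padded decimal representation of n
--     # (invariant: 0 <= n < 10**k, k >= 1); divide and conquer on digit blocks
--     if k <= 1:
--         return W[n]
--     kl = k // 2
--     p = 10 ** kl
--     return _holes(n // p, k - kl) + _holes(n % p, kl)
--
-- def closedPaths(number) -> int:
--     if number <= 0:
--         return 0
--     return _holes(number, len(str(number)))
-- ===== Notes on version B (the rewrite author's own statement) =====
-- stated objective: alternative
-- what changed: Replaces A's linear last-digit-extraction loop with an accumulator by a divide-and-conquer recursion that splits the number into high/low digit blocks (n // 10**(k//2), n % 10**(k//2)) down to single digits, which are resolved by a lookup table W of per-glyph hole counts; number <= 0 returns 0, where A's loop never runs.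
import Mathlib
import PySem

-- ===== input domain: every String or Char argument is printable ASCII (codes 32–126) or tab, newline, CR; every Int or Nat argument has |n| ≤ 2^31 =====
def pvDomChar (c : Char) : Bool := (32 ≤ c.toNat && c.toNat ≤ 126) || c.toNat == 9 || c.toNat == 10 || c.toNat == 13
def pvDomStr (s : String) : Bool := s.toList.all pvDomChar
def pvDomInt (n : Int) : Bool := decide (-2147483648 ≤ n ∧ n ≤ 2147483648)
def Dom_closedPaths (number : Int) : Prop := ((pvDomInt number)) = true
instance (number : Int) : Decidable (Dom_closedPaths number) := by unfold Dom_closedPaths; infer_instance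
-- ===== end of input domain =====

-- B replaces A's linear digit-extraction loop by a divide-and-conquer recursion over digit
-- blocks resolved through a per-glyph weight table (objective: alternative); equal return values proved below.

-- ===== PORT A =====
-- the while-loop of A with its accumulator cp; d = number % 10 (Python % = fmod), number //= 10 (Python // = fdiv)
def closedPathsGo (number : Int) (cp : Int) : Int :=
  if h : number > 0 then
    let d := PySem.Int.mod number 10
    let cp' := if d == 0 || d == 4 || d == 6 || d == 9 then cp + 1
               else if d == 8 then cp + 2 else cp
    closedPathsGo (PySem.Int.floordiv number 10) cp'
  else cp
termination_by number.toNat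
decreasing_by
  have h10 : PySem.Int.floordiv number 10 = number / 10 :=
    PySem.Int.floordiv_eq_ediv_of_pos (by norm_num)
  simp only [h10]
  omega

def closedPaths (number : Int) : Int := closedPathsGo number 0

-- ===== PORT B =====
-- the table W of Source B
def pvWTable : List Int := [1, 0, 0, 0, 1, 0, 1, 0, 2, 1]

-- _holes of Source B; every reachable call has 0 ≤ n < 10^k and 1 ≤ k, so W[n] never raises
-- (getD 0 is exact there) and 10 ** kl has a nonnegative exponent (ported as 10 ^ kl.toNat, exact there)
def holesGo (n k : Int) : Int :=
  if h : k ≤ 1 then (PySem.List.pyGet? pvWTable n).getD 0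
  else
    let kl := PySem.Int.floordiv k 2
    let p : Int := 10 ^ kl.toNat
    holesGo (PySem.Int.floordiv n p) (k - kl) + holesGo (PySem.Int.mod n p) kl
termination_by k.toNat
decreasing_by
  all_goals
    have h2 : PySem.Int.floordiv k 2 = k / 2 :=
      PySem.Int.floordiv_eq_ediv_of_pos (by norm_num)
    simp only [h2]
    omega

def closedPaths_alt (number : Int) : Int :=
  if number ≤ 0 then 0
  else holesGo number ((PySem.Int.toChars number).length : Int)  -- len(str(number))

-- ===== PRECONDITION & SPEC =====
def Spec_closedPaths (number : Int) (out : Int) : Prop := out = closedPaths_alt number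
instance (number : Int) (out : Int) : Decidable (Spec_closedPaths number out) := by unfold Spec_closedPaths; infer_instance

-- ===== CLAIM (what is proved, stated in full; the proofs are below) =====
def Claim_equal_closedPaths : Prop := ∀ (number : Int), Dom_closedPaths number → Spec_closedPaths number (closedPaths number)

-- ===== LEMMAS AND PROOFS =====

-- weight of one decimal digit (number of closed loops in its glyph)
def pvW (d : Nat) : Int := if d = 0 ∨ d = 4 ∨ d = 6 ∨ d = 9 then 1 else if d = 8 then 2 else 0

-- weighted digit sum of a natural number (A's loop value)
def pvWsum (n : Nat) : Int :=
  if h : n = 0 then 0 else pvW (n % 10) + pvWsum (n / 10)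
decreasing_by exact Nat.div_lt_self (Nat.pos_of_ne_zero h) (by norm_num)

-- weighted digit sum over exactly k (zero-padded) digits (B's recursion value)
def pvWsumPad (n : Nat) : Nat → Int
  | 0 => 0
  | k + 1 => pvW (n % 10) + pvWsumPad (n / 10) k

-- digits of n, most significant first, as structural recursion on n
def pvDigits (n : Nat) : List Char :=
  if h : n < 10 then [Nat.digitChar n]
  else pvDigits (n / 10) ++ [Nat.digitChar (n % 10)]
decreasing_by exact Nat.div_lt_self (by omega) (by norm_num)

-- number of decimal digits of n
def pvLen (n : Nat) : Nat :=
  if h : n < 10 then 1 else pvLen (n / 10) + 1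
decreasing_by exact Nat.div_lt_self (by omega) (by norm_num)

lemma toDigitsCore_shift (fuel n : Nat) (ds : List Char) :
    Nat.toDigitsCore 10 fuel n ds = Nat.toDigitsCore 10 fuel n [] ++ ds := by
  induction fuel generalizing n ds with
  | zero => simp [Nat.toDigitsCore]
  | succ f ih =>
    simp only [Nat.toDigitsCore]
    by_cases h : n / 10 = 0
    · simp [h]
    · simp only [h]
      rw [ih (n / 10) [Nat.digitChar (n % 10)], ih (n / 10) (Nat.digitChar (n % 10) :: ds)]
      simp

lemma toDigitsCore_eq_pvDigits (fuel n : Nat) (h : n < fuel) :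
    Nat.toDigitsCore 10 fuel n [] = pvDigits n := by
  induction fuel generalizing n with
  | zero => omega
  | succ f ih =>
    simp only [Nat.toDigitsCore]
    by_cases h0 : n / 10 = 0
    · have hn : n < 10 := by omega
      rw [pvDigits]
      simp [h0, hn, Nat.mod_eq_of_lt hn]
    · have hn : ¬ n < 10 := fun hc => h0 (Nat.div_eq_of_lt hc)
      have hlt : n / 10 < f := by
        have := Nat.div_lt_self (by omega : 0 < n) (by norm_num : 1 < 10)
        omega
      rw [pvDigits]
      simp only [if_neg h0, dif_neg hn]
      rw [toDigitsCore_shift, ih (n / 10) hlt]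

lemma toDigits_eq_pvDigits (n : Nat) : Nat.toDigits 10 n = pvDigits n := by
  rw [Nat.toDigits, toDigitsCore_eq_pvDigits (n + 1) n (by omega)]

lemma pvDigits_length (n : Nat) : (pvDigits n).length = pvLen n := by
  induction n using Nat.strong_induction_on with
  | _ n ih =>
    rw [pvDigits, pvLen]
    by_cases h : n < 10
    · simp [h]
    · rw [dif_neg h, dif_neg h]
      simp [ih (n / 10) (Nat.div_lt_self (by omega) (by norm_num))]

lemma pvLen_pos (n : Nat) : 1 ≤ pvLen n := by
  rw [pvLen]
  split <;> omega

lemma pvLen_bounds (n : Nat) (hn : 0 < n) :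
    10 ^ (pvLen n - 1) ≤ n ∧ n < 10 ^ pvLen n := by
  induction n using Nat.strong_induction_on with
  | _ n ih =>
    rw [pvLen]
    by_cases h : n < 10
    · simp [h]; omega
    · rw [dif_neg h]
      have hpos : 0 < n / 10 := Nat.div_pos (by omega) (by norm_num)
      obtain ⟨lo, hi⟩ := ih (n / 10) (Nat.div_lt_self (by omega) (by norm_num)) hpos
      have hL := pvLen_pos (n / 10)
      constructor
      · have : 10 ^ (pvLen (n / 10) - 1) * 10 ≤ n / 10 * 10 := by omega
        calc 10 ^ (pvLen (n / 10) + 1 - 1) = 10 ^ (pvLen (n / 10) - 1) * 10 := by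
              rw [← pow_succ]; congr 1; omega
          _ ≤ n / 10 * 10 := this
          _ ≤ n := Nat.div_mul_le_self n 10
      · have hdm := Nat.div_add_mod n 10
        have hm10 := Nat.mod_lt n (show 0 < 10 by norm_num)
        have : n < (n / 10 + 1) * 10 := by omega
        calc n < (n / 10 + 1) * 10 := this
          _ ≤ 10 ^ pvLen (n / 10) * 10 := by
              have : n / 10 + 1 ≤ 10 ^ pvLen (n / 10) := hi
              exact Nat.mul_le_mul_right 10 this
          _ = 10 ^ (pvLen (n / 10) + 1) := by rw [pow_succ]

lemma pvWsum_pos (n : Nat) (h : ¬ n = 0) : pvWsum n = pvW (n % 10) + pvWsum (n / 10) := by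
  conv_lhs => rw [pvWsum]
  rw [dif_neg h]

-- pvWsumPad with the exact digit count is pvWsum
lemma pvWsumPad_eq_pvWsum (k : Nat) :
    ∀ n : Nat, 1 ≤ k → 10 ^ (k - 1) ≤ n → n < 10 ^ k → pvWsumPad n k = pvWsum n := by
  induction k with
  | zero => intro n h1 _ _; omega
  | succ k ih =>
    intro n _ hlo hhi
    by_cases hk : k = 0
    · subst hk
      have h10 : n < 10 := by simpa using hhi
      have h1 : 1 ≤ n := by simpa using hlo
      have h0 : n / 10 = 0 := Nat.div_eq_of_lt h10
      rw [pvWsum_pos n (by omega), h0]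
      show pvW (n % 10) + pvWsumPad (n / 10) 0 = pvW (n % 10) + pvWsum 0
      rw [pvWsum]
      simp [pvWsumPad]
    · have hk1 : 1 ≤ k := by omega
      have hn0 : n ≠ 0 := by
        have : (1:Nat) ≤ 10 ^ (k + 1 - 1) := Nat.one_le_pow _ _ (by norm_num)
        omega
      rw [pvWsum_pos n hn0]
      show pvW (n % 10) + pvWsumPad (n / 10) k = pvW (n % 10) + pvWsum (n / 10)
      congr 1
      apply ih (n / 10) hk1
      · have heq : 10 ^ (k - 1) * 10 = 10 ^ k := by
          rw [← pow_succ]; congr 1; omega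
        have hle : 10 ^ k ≤ n := by
          have : 10 ^ (k + 1 - 1) = 10 ^ k := by congr 1
          omega
        have : 10 ^ (k - 1) * 10 ≤ n := by omega
        omega
      · have : n < 10 ^ k * 10 := by rw [← pow_succ]; exact hhi
        omega

-- the divide-and-conquer split identity for zero-padded weighted digit sums
lemma pvWsumPad_split (kl k n : Nat) (h : kl ≤ k) :
    pvWsumPad n k = pvWsumPad (n / 10 ^ kl) (k - kl) + pvWsumPad (n % 10 ^ kl) kl := by
  induction kl generalizing k n with
  | zero => simp [pvWsumPad]
  | succ kl ih =>
    obtain ⟨m, rfl⟩ : ∃ m, k = m + 1 := ⟨k - 1, by omega⟩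
    have hkl : kl ≤ m := by omega
    have e1 : n / 10 ^ (kl + 1) = (n / 10) / 10 ^ kl := by
      rw [pow_succ', Nat.div_div_eq_div_mul]
    have e2 : n % 10 ^ (kl + 1) % 10 = n % 10 := by
      apply Nat.mod_mod_of_dvd
      exact ⟨10 ^ kl, by rw [pow_succ']⟩
    have e3 : n % 10 ^ (kl + 1) / 10 = (n / 10) % 10 ^ kl := by
      rw [pow_succ', Nat.mod_mul_right_div_self]
    rw [pvWsumPad, pvWsumPad, e1, e2, e3]
    have : m + 1 - (kl + 1) = m - kl := by omega
    rw [this, ih m (n / 10) hkl]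
    ring

-- floor division / modulus of nonnegative ints are Nat division / modulus
lemma floordiv_toNat (a b : Int) (ha : 0 ≤ a) (hb : 0 < b) :
    PySem.Int.floordiv a b = ((a.toNat / b.toNat : Nat) : Int) := by
  conv_lhs => rw [← Int.toNat_of_nonneg ha, ← Int.toNat_of_nonneg (le_of_lt hb)]
  exact PySem.Int.floordiv_natCast _ _

lemma mod_toNat (a b : Int) (ha : 0 ≤ a) (hb : 0 < b) :
    PySem.Int.mod a b = ((a.toNat % b.toNat : Nat) : Int) := by
  conv_lhs => rw [← Int.toNat_of_nonneg ha, ← Int.toNat_of_nonneg (le_of_lt hb)]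
  exact PySem.Int.mod_natCast _ _

-- one unfolding step of holesGo on the recursive branch (zeta-reduced)
lemma holesGo_step (n k : Int) (hb : ¬ k ≤ 1) :
    holesGo n k =
      holesGo (PySem.Int.floordiv n (10 ^ (PySem.Int.floordiv k 2).toNat))
          (k - PySem.Int.floordiv k 2)
        + holesGo (PySem.Int.mod n (10 ^ (PySem.Int.floordiv k 2).toNat))
          (PySem.Int.floordiv k 2) := by
  rw [holesGo, dif_neg hb]

-- B's recursion computes the zero-padded weighted digit sum
lemma holesGo_eq (K : Nat) (n k : Int) (hK : k.toNat = K) (hk : 1 ≤ k) (hn : 0 ≤ n)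
    (hlt : n < (10 : Int) ^ k.toNat) :
    holesGo n k = pvWsumPad n.toNat k.toNat := by
  induction K using Nat.strong_induction_on generalizing n k with
  | _ K ih =>
    by_cases hb : k ≤ 1
    · have hk1 : k = 1 := le_antisymm hb hk
      subst hk1
      rw [holesGo, dif_pos (by norm_num)]
      have h10 : n < 10 := by simpa using hlt
      interval_cases n <;> decide
    · have hk2 : 2 ≤ k := by omega
      have hklE : PySem.Int.floordiv k 2 = k / 2 :=
        PySem.Int.floordiv_eq_ediv_of_pos (by norm_num)
      set kl : Int := PySem.Int.floordiv k 2 with hkldef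
      have hkl1 : 1 ≤ kl := by rw [hklE]; omega
      have hklk : kl < k := by rw [hklE]; omega
      have hppos : (0:Int) < 10 ^ kl.toNat := by positivity
      have hpcast : ((10:Int) ^ kl.toNat) = ((10 ^ kl.toNat : Nat) : Int) := by
        push_cast; ring
      have hptoNat : ((10:Int) ^ kl.toNat).toNat = 10 ^ kl.toNat := by
        rw [hpcast, Int.toNat_natCast]
      have hdivE := floordiv_toNat n (10 ^ kl.toNat) hn hppos
      have hmodE := mod_toNat n (10 ^ kl.toNat) hn hppos
      rw [holesGo_step n k hb, ← hkldef, hdivE, hmodE, hptoNat]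
      have hkN : k.toNat = (k - kl).toNat + kl.toNat := by omega
      -- high part
      have hhiK : (k - kl).toNat < K := by omega
      have hhik : 1 ≤ k - kl := by omega
      have hhin : (0:Int) ≤ ((n.toNat / 10 ^ kl.toNat : Nat) : Int) := by positivity
      have hhilt : ((n.toNat / 10 ^ kl.toNat : Nat) : Int) < (10:Int) ^ (k - kl).toNat := by
        have hnN : n.toNat < 10 ^ k.toNat := by
          have : n < ((10 ^ k.toNat : Nat) : Int) := by push_cast; exact hlt
          omega
        have : n.toNat / 10 ^ kl.toNat < 10 ^ (k - kl).toNat := by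
          apply Nat.div_lt_of_lt_mul
          calc n.toNat < 10 ^ k.toNat := hnN
            _ = 10 ^ (kl.toNat + (k - kl).toNat) := by congr 1; omega
            _ = 10 ^ kl.toNat * 10 ^ (k - kl).toNat := by rw [pow_add]
        have := this
        push_cast
        exact_mod_cast this
      have h1 := ih (k - kl).toNat hhiK _ (k - kl) rfl hhik hhin hhilt
      -- low part
      have hloK : kl.toNat < K := by omega
      have hlon : (0:Int) ≤ ((n.toNat % 10 ^ kl.toNat : Nat) : Int) := by positivity
      have hlolt : ((n.toNat % 10 ^ kl.toNat : Nat) : Int) < (10:Int) ^ kl.toNat := by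
        have : n.toNat % 10 ^ kl.toNat < 10 ^ kl.toNat :=
          Nat.mod_lt _ (pow_pos (by norm_num) _)
        push_cast
        exact_mod_cast this
      have h2 := ih kl.toNat hloK _ kl rfl hkl1 hlon hlolt
      rw [h1, h2]
      simp only [Int.toNat_natCast]
      have hsub : (k - kl).toNat = k.toNat - kl.toNat := by omega
      rw [hsub]
      exact (pvWsumPad_split kl.toNat k.toNat n.toNat (by omega)).symm

lemma branch_eq_pvW (m : Nat) (hm : m < 10) (cp : Int) :
    (if (m : Int) == 0 || (m : Int) == 4 || (m : Int) == 6 || (m : Int) == 9 then cp + 1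
     else if (m : Int) == 8 then cp + 2 else cp) = cp + pvW m := by
  interval_cases m <;> norm_num [pvW]

-- A's loop computes cp + pvWsum n for a nonnegative argument
lemma closedPathsGo_eq (n : Nat) (cp : Int) :
    closedPathsGo (n : Int) cp = cp + pvWsum n := by
  induction n using Nat.strong_induction_on generalizing cp with
  | _ n ih =>
    rw [closedPathsGo]
    by_cases h0 : n = 0
    · subst h0; rw [pvWsum]; norm_num
    · have hpos : (0 : Int) < (n : Int) := by exact_mod_cast Nat.pos_of_ne_zero h0
      rw [dif_pos hpos]
      have hmod : PySem.Int.mod (n : Int) 10 = ((n % 10 : Nat) : Int) := by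
        rw [mod_toNat _ _ (by positivity) (by norm_num)]
        simp
      have hdiv : PySem.Int.floordiv (n : Int) 10 = ((n / 10 : Nat) : Int) := by
        rw [floordiv_toNat _ _ (by positivity) (by norm_num)]
        simp
      simp only [hmod, hdiv]
      rw [branch_eq_pvW (n % 10) (Nat.mod_lt _ (by norm_num)) cp]
      rw [ih (n / 10) (Nat.div_lt_self (Nat.pos_of_ne_zero h0) (by norm_num))]
      rw [pvWsum_pos n h0]
      ring

-- ===== VERDICT (by name: the statement is the Claim_ definition above) =====
theorem closedPaths_spec : Claim_equal_closedPaths := by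
  intro number _
  unfold Spec_closedPaths closedPaths closedPaths_alt
  by_cases hp : number ≤ 0
  · rw [closedPathsGo, dif_neg (by omega : ¬ number > 0), if_pos hp]
  · rw [if_neg hp]
    have hn1 : 1 ≤ number := by omega
    set N : Nat := number.toNat with hN
    have hnum : number = (N : Int) := by omega
    have hNpos : 0 < N := by omega
    have hchars : PySem.Int.toChars number = pvDigits N := by
      show (if number < 0 then _ else Nat.toDigits 10 number.toNat) = _
      rw [if_neg (by omega : ¬ number < 0), toDigits_eq_pvDigits]
    obtain ⟨hlo, hhi⟩ := pvLen_bounds N hNpos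
    have hL1 := pvLen_pos N
    have hlen : ((PySem.Int.toChars number).length : Int) = (pvLen N : Int) := by
      rw [hchars, pvDigits_length]
    rw [hlen]
    have htoNat : ((pvLen N : Int)).toNat = pvLen N := by simp
    have hge : holesGo number (pvLen N : Int) = pvWsumPad number.toNat ((pvLen N : Int)).toNat := by
      apply holesGo_eq ((pvLen N : Int)).toNat _ _ rfl (by exact_mod_cast hL1) (by omega)
      rw [htoNat, hnum]
      exact_mod_cast hhi
    rw [hge, htoNat, ← hN]
    rw [pvWsumPad_eq_pvWsum (pvLen N) N hL1 hlo hhi]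
    rw [hnum, closedPathsGo_eq]
    ring
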